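-- pv_equiv track=rewrite | github.com/BerriAI/litellm | litellm/proxy/guardrails/guardrail_hooks/natasha_ru_person/natasha_ru_person.py | substring_fully_covered_by_spans
-- ===== SOURCE A (Python) =====
-- from typing import Any, List, Optional, Tuple, Union
--
-- def merge_overlapping_intervals(
--     intervals: List[Tuple[int, int]],
-- ) -> List[Tuple[int, int]]:
--     if not intervals:
--         return []
--     intervals = sorted(intervals, key=lambda x: (x[0], x[1]))
--     merged: List[Tuple[int, int]] = [intervals[0]]
--     for s, e in intervals[1:]:
--         ps, pe = merged[-1]
--         if s <= pe:
--             merged[-1] = (ps, max(pe, e))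
--         else:
--             merged.append((s, e))
--     return merged
--
-- def substring_fully_covered_by_spans(
--     haystack: str, needle: str, spans: List[Tuple[int, int, str]]
-- ) -> bool:
--     """
--     Return True iff some occurrence of ``needle`` in ``haystack`` lies entirely
--     inside the union of half-open intervals [start, stop) from PER spans.
--     """
--     if not needle:
--         return True
--     if not spans:
--         return False
--     idx = 0
--     norm = [(int(s), int(e)) for s, e, _ in spans]
--     merged = merge_overlapping_intervals(norm)
--     while True:
--         pos = haystack.find(needle, idx)
--         if pos < 0:
--             return False
--         end = pos + len(needle)
--         if all(any(ms <= j < me for ms, me in merged) for j in range(pos, end)):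
--             return True
--         idx = pos + 1
-- ===== SOURCE B (Python) =====
-- def substring_fully_covered_by_spans(haystack, needle, spans):
--     if not needle:
--         return True
--     merged = []
--     for s, e in sorted((int(s), int(e)) for s, e, _ in spans):
--         if merged and s <= merged[-1][1]:
--             if e > merged[-1][1]:
--                 merged[-1] = (merged[-1][0], e)
--         else:
--             merged.append((s, e))
--     return any(needle in haystack[max(s, 0):max(e, 0)] for s, e in merged)
-- ===== Notes on version B (the rewrite author's own statement) =====
-- stated objective: alternative
-- what changed: Instead of iterating haystack.find occurrences and testing every character position against every merged interval, B merges the spans once and searches the needle directly inside each merged interval's slice of the haystack (a contiguous range is covered by disjoint merged intervals iff it lies inside a single one).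
import Mathlib
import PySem

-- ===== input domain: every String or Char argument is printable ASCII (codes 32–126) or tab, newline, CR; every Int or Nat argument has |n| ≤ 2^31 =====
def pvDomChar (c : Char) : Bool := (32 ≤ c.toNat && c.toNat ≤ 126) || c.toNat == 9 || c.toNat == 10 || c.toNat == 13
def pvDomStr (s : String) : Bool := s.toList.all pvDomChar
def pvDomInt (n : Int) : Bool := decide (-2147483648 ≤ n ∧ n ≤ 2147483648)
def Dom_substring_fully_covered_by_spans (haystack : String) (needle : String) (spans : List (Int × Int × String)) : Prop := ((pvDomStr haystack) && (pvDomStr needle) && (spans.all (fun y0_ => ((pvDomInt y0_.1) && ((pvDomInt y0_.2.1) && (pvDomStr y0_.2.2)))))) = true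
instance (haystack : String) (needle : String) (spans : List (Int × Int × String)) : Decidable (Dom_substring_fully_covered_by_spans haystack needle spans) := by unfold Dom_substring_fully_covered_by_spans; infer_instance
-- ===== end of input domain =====

-- ===== PORT A =====
-- B searches the needle directly inside each merged interval's slice of the haystack,
-- replacing A's find-loop with its per-character any-interval scans (alternative algorithm).

-- ===== PORT A =====
-- step of A's merge loop: acc is the merged list in reverse (head = merged[-1])
def pvStepA (acc : List (Int × Int)) (se : Int × Int) : List (Int × Int) :=
  match acc with
  | [] => [se]
  | (ps, pe) :: rest => if se.1 ≤ pe then (ps, max pe se.2) :: rest else se :: (ps, pe) :: rest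

def merge_overlapping_intervals (intervals : List (Int × Int)) : List (Int × Int) :=
  if intervals = [] then []
  else
    match PySem.List.sorted intervals (fun x => toLex (x.1, x.2)) with
    | [] => []
    | h :: t => (t.foldl pvStepA [h]).reverse

-- A's inner check: all(any(ms <= j < me for ms, me in merged) for j in range(pos, fin))
def pvCov (merged : List (Int × Int)) (pos fin : Int) : Bool :=
  (PySem.List.pyRange pos fin).all (fun j => merged.any (fun p => decide (p.1 ≤ j) && decide (j < p.2)))

-- A's `while True` loop over haystack.find(needle, idx); the fuel bounds the iterations
-- (each iteration strictly increases idx ≤ len(haystack), so len(haystack)+1 suffices)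
def pvLoopA (hs nd : List Char) (merged : List (Int × Int)) : Nat → Int → Bool
  | 0, _ => false
  | fuel+1, idx =>
    let pos := PySem.Chars.findFrom hs nd idx
    if pos < 0 then false
    else if pvCov merged pos (pos + nd.length) then true
    else pvLoopA hs nd merged fuel (pos + 1)

def substring_fully_covered_by_spans (haystack : String) (needle : String) (spans : List (Int × Int × String)) : Bool :=
  if needle.toList = [] then true
  else if spans = [] then false
  else
    let norm := spans.map (fun t => (t.1, t.2.1))
    let merged := merge_overlapping_intervals norm
    pvLoopA haystack.toList needle.toList merged (haystack.toList.length + 1) 0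

-- ===== PORT B =====
-- step of B's merge loop (extends merged[-1] in place only when e exceeds its end)
def pvStepB (acc : List (Int × Int)) (se : Int × Int) : List (Int × Int) :=
  match acc with
  | [] => [se]
  | (ps, pe) :: rest =>
    if se.1 ≤ pe then (if pe < se.2 then (ps, se.2) :: rest else (ps, pe) :: rest)
    else se :: (ps, pe) :: rest

def substring_fully_covered_by_spans_alt (haystack : String) (needle : String) (spans : List (Int × Int × String)) : Bool :=
  if needle.toList = [] then true
  else
    let merged := ((PySem.List.sorted (spans.map (fun t => (t.1, t.2.1)))
        (fun x => toLex (x.1, x.2))).foldl pvStepB []).reverse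
    merged.any (fun p =>
      PySem.Chars.isIn needle.toList
        (PySem.List.slice haystack.toList (some (max p.1 0)) (some (max p.2 0))))

-- ===== PRECONDITION & SPEC =====
def Spec_substring_fully_covered_by_spans (haystack : String) (needle : String) (spans : List (Int × Int × String)) (out : Bool) : Prop := out = substring_fully_covered_by_spans_alt haystack needle spans
instance (haystack : String) (needle : String) (spans : List (Int × Int × String)) (out : Bool) : Decidable (Spec_substring_fully_covered_by_spans haystack needle spans out) := by unfold Spec_substring_fully_covered_by_spans; infer_instance

-- ===== CLAIM (what is proved, stated in full; the proofs are below) =====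
def Claim_equal_substring_fully_covered_by_spans : Prop := ∀ (haystack : String) (needle : String) (spans : List (Int × Int × String)), Dom_substring_fully_covered_by_spans haystack needle spans → Spec_substring_fully_covered_by_spans haystack needle spans (substring_fully_covered_by_spans haystack needle spans)

-- ===== LEMMAS AND PROOFS =====

-- separation invariant carried by the (reversed) merge accumulator
lemma foldl_stepA_sep (l : List (Int × Int)) :
    ∀ (acc : List (Int × Int)),
    List.Pairwise (fun a b => a.1 ≤ b.1) l →
    (∀ p ∈ acc, ∀ q ∈ l, p.1 ≤ q.1) →
    List.Pairwise (fun a b : Int × Int => b.2 < a.1 ∧ b.1 ≤ a.1) acc →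
    List.Pairwise (fun a b : Int × Int => b.2 < a.1 ∧ b.1 ≤ a.1) (l.foldl pvStepA acc) := by
  induction l with
  | nil => intro acc _ _ h; simpa using h
  | cons se l ih =>
    intro acc hsorted hle hacc
    rw [List.foldl_cons]
    have hsl : List.Pairwise (fun a b : Int × Int => a.1 ≤ b.1) l := hsorted.of_cons
    have hse_l : ∀ q ∈ l, se.1 ≤ q.1 := by
      intro q hq; exact (List.pairwise_cons.mp hsorted).1 q hq
    cases acc with
    | nil =>
      apply ih [se] hsl
      · intro p hp q hq
        simp only [List.mem_singleton] at hp; subst hp; exact hse_l q hq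
      · simp
    | cons h rest =>
      obtain ⟨ps, pe⟩ := h
      have hps_se : ps ≤ se.1 := hle (ps, pe) (by simp) se (by simp)
      have hrest : ∀ b ∈ rest, b.2 < ps ∧ b.1 ≤ ps := (List.pairwise_cons.mp hacc).1
      simp only [pvStepA]
      split_ifs with h1
      · -- extend last interval
        apply ih _ hsl
        · intro p hp q hq
          have hps : p.1 = ps ∨ p ∈ rest := by
            rcases List.mem_cons.mp hp with h | h
            · left; rw [h]
            · right; exact h
          rcases hps with h | h
          · rw [h]; exact hle (ps, pe) (by simp) q (List.mem_cons_of_mem _ hq)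
          · exact hle p (List.mem_cons_of_mem _ h) q (List.mem_cons_of_mem _ hq)
        · exact List.pairwise_cons.mpr ⟨fun b hb => hrest b hb, hacc.of_cons⟩
      · -- start a new interval
        push_neg at h1
        apply ih _ hsl
        · intro p hp q hq
          rcases List.mem_cons.mp hp with h | h
          · subst h; exact hse_l q hq
          · exact hle p h q (List.mem_cons_of_mem _ hq)
        · refine List.pairwise_cons.mpr ⟨?_, hacc⟩
          intro b hb
          rcases List.mem_cons.mp hb with h | h
          · subst h; exact ⟨h1, hps_se⟩
          · obtain ⟨h2, h3⟩ := hrest b h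
            exact ⟨by omega, by omega⟩

-- the sort key (x[0], x[1]) sorts by first component in particular
lemma sorted_fst_pairwise (xs : List (Int × Int)) :
    List.Pairwise (fun a b : Int × Int => a.1 ≤ b.1)
      (PySem.List.sorted xs (fun x => toLex (x.1, x.2))) := by
  have h := PySem.List.sorted_pairwise xs (fun x : Int × Int => toLex (x.1, x.2))
  refine h.imp ?_
  intro a b h
  rcases Prod.Lex.le_iff.mp h with h | ⟨h, _⟩
  · exact le_of_lt h
  · exact le_of_eq h

-- merged intervals are pairwise separated (left one ends strictly before the right one starts)
lemma merged_sep (xs : List (Int × Int)) :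
    List.Pairwise (fun a b : Int × Int => a.2 < b.1 ∧ a.1 ≤ b.1)
      (merge_overlapping_intervals xs) := by
  unfold merge_overlapping_intervals
  split_ifs with h
  · simp
  · have hp := sorted_fst_pairwise xs
    cases hs : PySem.List.sorted xs (fun x => toLex (x.1, x.2)) with
    | nil => simp
    | cons h t =>
      rw [hs] at hp
      rw [List.pairwise_reverse]
      exact foldl_stepA_sep t [h] hp.of_cons
        (by intro p hp' q hq; simp only [List.mem_singleton] at hp'; subst hp'
            exact (List.pairwise_cons.mp hp).1 q hq)
        (by simp)

-- the two merge steps agree (max pe e vs conditional update)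
lemma foldl_stepB_eq (l : List (Int × Int)) (acc : List (Int × Int)) :
    l.foldl pvStepB acc = l.foldl pvStepA acc := by
  have h : pvStepB = pvStepA := by
    funext acc se
    cases acc with
    | nil => rfl
    | cons h rest =>
      obtain ⟨ps, pe⟩ := h
      simp only [pvStepB, pvStepA]
      split_ifs with h1 h2 <;> simp_all <;> omega
  rw [h]

-- B's merged list equals A's
lemma mergedB_eq (xs : List (Int × Int)) (hxs : xs ≠ []) :
    ((PySem.List.sorted xs (fun x => toLex (x.1, x.2))).foldl pvStepB []).reverse
      = merge_overlapping_intervals xs := by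
  unfold merge_overlapping_intervals
  rw [if_neg hxs]
  cases hs : PySem.List.sorted xs (fun x => toLex (x.1, x.2)) with
  | nil =>
    exact absurd ((PySem.List.sorted_eq_nil_iff xs _ _).mp hs) hxs
  | cons h t =>
    rw [List.foldl_cons]
    have hb : pvStepB [] h = [h] := rfl
    rw [hb, foldl_stepB_eq]

-- gap lemma: a nonempty contiguous range is covered by the union of separated
-- intervals iff it lies inside a single one
lemma cov_iff (merged : List (Int × Int))
    (hsep : List.Pairwise (fun a b : Int × Int => a.2 < b.1 ∧ a.1 ≤ b.1) merged)
    (pos : Int) (k : Nat) (hk : 0 < k) :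
    pvCov merged pos (pos + k) = true ↔ ∃ p ∈ merged, p.1 ≤ pos ∧ pos + k ≤ p.2 := by
  unfold pvCov
  simp only [List.all_eq_true, List.any_eq_true, PySem.List.mem_pyRange_one,
    Bool.and_eq_true, decide_eq_true_eq]
  constructor
  · intro h
    obtain ⟨p0, hp0m, hp01, hp02⟩ := h pos ⟨le_refl _, by omega⟩
    refine ⟨p0, hp0m, hp01, ?_⟩
    have key : ∀ i : Nat, i < k → pos + (i : Int) < p0.2 := by
      intro i
      induction i with
      | zero => intro _; simpa using hp02
      | succ i ih =>
        intro hik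
        have hi : pos + (i : Int) < p0.2 := ih (by omega)
        obtain ⟨q, hqm, hq1, hq2⟩ := h (pos + (i : Int) + 1) ⟨by omega, by push_cast; omega⟩
        obtain ⟨i0, hi0, he0⟩ := List.mem_iff_getElem.mp hp0m
        obtain ⟨iq, hiq, heq⟩ := List.mem_iff_getElem.mp hqm
        have hpw := List.pairwise_iff_getElem.mp hsep
        rcases lt_trichotomy iq i0 with hlt | heqi | hgt
        · have := hpw iq i0 hiq hi0 hlt
          rw [heq, he0] at this
          omega
        · have hqp : q = p0 := by subst heqi; rw [← heq, he0]
          rw [hqp] at hq2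
          push_cast
          omega
        · have := hpw i0 iq hi0 hiq hgt
          rw [heq, he0] at this
          omega
    have := key (k - 1) (by omega)
    have hc : ((k - 1 : Nat) : Int) = (k : Int) - 1 := by omega
    omega
  · rintro ⟨p, hpm, hp1, hp2⟩ j ⟨hj1, hj2⟩
    exact ⟨p, hpm, by omega, by omega⟩

-- slice lemma: the needle occurs in haystack[max x 0 : max y 0] iff some occurrence
-- of it in the haystack lies inside [x, y)
lemma isIn_slice_iff (hs nd : List Char) (hnd : nd ≠ []) (x y : Int) :
    (PySem.Chars.isIn nd (PySem.List.slice hs (some (max x 0)) (some (max y 0))) = true)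
      ↔ ∃ pos : Nat, x ≤ (pos : Int) ∧ (pos : Int) + nd.length ≤ y ∧ nd <+: hs.drop pos := by
  have hk : 0 < nd.length := List.length_pos_iff.mpr hnd
  set a : Nat := (max x 0).toNat with ha
  set b : Nat := (max y 0).toNat with hb
  have hxa : max x 0 = (a : Int) := (Int.toNat_of_nonneg (le_max_right x 0)).symm
  have hyb : max y 0 = (b : Int) := (Int.toNat_of_nonneg (le_max_right y 0)).symm
  rw [hxa, hyb, PySem.List.slice_natCast, ← PySem.Chars.exists_prefix_drop_iff_isIn]
  have hxa' : x ≤ (a : Int) ∧ ((0:Int) ≤ x → (a : Int) = x) := by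
    constructor
    · rw [← hxa]; exact le_max_left x 0
    · intro h0; rw [← hxa]; omega
  have hyb' : y ≤ (b : Int) ∧ ((0:Int) ≤ y → (b : Int) = y) := by
    constructor
    · rw [← hyb]; exact le_max_left y 0
    · intro h0; rw [← hyb]; omega
  constructor
  · rintro ⟨j, hj⟩
    rw [List.drop_take, List.drop_drop, List.prefix_take_iff] at hj
    obtain ⟨hpre, hlen⟩ := hj
    refine ⟨a + j, ?_, ?_, hpre⟩
    · push_cast; omega
    · push_cast; omega
  · rintro ⟨pos, hxp, hpy, hpre⟩
    have hapos : a ≤ pos := by omega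
    have hbpos : pos + nd.length ≤ b := by omega
    refine ⟨pos - a, ?_⟩
    rw [List.drop_take, List.drop_drop, List.prefix_take_iff]
    have heq : a + (pos - a) = pos := by omega
    rw [heq]
    exact ⟨hpre, by omega⟩

-- loop lemma: A's find-loop returns true iff some occurrence at or after idx passes pvCov
lemma pvLoopA_iff (hs nd : List Char) (merged : List (Int × Int)) (hnd : nd ≠ []) :
    ∀ (fuel idx : Nat), idx ≤ hs.length → hs.length + 1 - idx ≤ fuel →
    (pvLoopA hs nd merged fuel (idx : Int) = true ↔
      ∃ pos : Nat, idx ≤ pos ∧ nd <+: hs.drop pos ∧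
        pvCov merged (pos : Int) ((pos : Int) + nd.length) = true) := by
  intro fuel
  induction fuel with
  | zero => intro idx h1 h2; omega
  | succ fuel ih =>
    intro idx hidx hfuel
    rw [pvLoopA]
    rw [PySem.Chars.findFrom_natCast hs nd idx hidx]
    by_cases hf : PySem.Chars.find (List.drop idx hs) nd = -1
    · rw [if_pos hf]
      norm_num
      intro pos hge hpre
      exfalso
      have hdd : (List.drop idx hs).drop (pos - idx) = List.drop pos hs := by
        rw [List.drop_drop]
        congr 1
        omega
      have hin : PySem.Chars.isIn nd (List.drop idx hs) = true :=
        (PySem.Chars.exists_prefix_drop_iff_isIn nd (List.drop idx hs)).mp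
          ⟨pos - idx, by rw [hdd]; exact hpre⟩
      rw [PySem.Chars.isIn_iff_infix] at hin
      exact (PySem.Chars.find_eq_neg_one_iff (List.drop idx hs) nd).mp hf hin
    · rw [if_neg hf]
      have hf0 : 0 ≤ PySem.Chars.find (List.drop idx hs) nd := by
        have := PySem.Chars.neg_one_le_find (List.drop idx hs) nd
        omega
      set f : Int := PySem.Chars.find (List.drop idx hs) nd with hfdef
      obtain ⟨hpre0, hmin⟩ := PySem.Chars.find_spec hf0
      set posN : Nat := f.toNat + idx with hposN
      have hfc : ((f.toNat : Nat) : Int) = f := Int.toNat_of_nonneg hf0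
      have hcast : (idx : Int) + f = ((posN : Nat) : Int) := by
        rw [hposN]; push_cast; omega
      have hprepos : nd <+: List.drop posN hs := by
        have hdd : (List.drop idx hs).drop f.toNat = List.drop posN hs := by
          rw [List.drop_drop]; congr 1; omega
        rw [← hdd]
        exact hpre0
      have hposlt : posN < hs.length := by
        by_contra hle
        have hdn : List.drop posN hs = [] := List.drop_eq_nil_of_le (by omega)
        rw [hdn] at hprepos
        exact hnd (List.prefix_nil.mp hprepos)
      have hnotneg : ¬ ((idx : Int) + f < 0) := by omega
      rw [if_neg hnotneg, hcast]
      by_cases hcov : pvCov merged ((posN : Nat) : Int) (((posN : Nat) : Int) + nd.length) = true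
      · rw [if_pos hcov]
        simp only [true_iff]
        exact ⟨posN, by omega, hprepos, hcov⟩
      · rw [if_neg hcov]
        have hstep : ((posN : Nat) : Int) + 1 = (((posN + 1 : Nat) : Nat) : Int) := by push_cast; omega
        rw [hstep]
        rw [ih (posN + 1) (by omega) (by omega)]
        constructor
        · rintro ⟨pos, hge, hpre, hc⟩
          exact ⟨pos, by omega, hpre, hc⟩
        · rintro ⟨pos, hge, hpre, hc⟩
          refine ⟨pos, ?_, hpre, hc⟩
          by_contra hlt
          push_neg at hlt
          rcases Nat.lt_or_ge pos posN with hlt2 | hge2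
          · have hdd : (List.drop idx hs).drop (pos - idx) = List.drop pos hs := by
              rw [List.drop_drop]; congr 1; omega
            have hm := hmin (pos - idx) (by omega)
            rw [hdd] at hm
            exact hm hpre
          · have hpe : pos = posN := by omega
            subst hpe
            exact hcov hc

-- ===== VERDICT (by name: the statement is the Claim_ definition above) =====
theorem substring_fully_covered_by_spans_spec : Claim_equal_substring_fully_covered_by_spans := by
  intro haystack needle spans _
  unfold Spec_substring_fully_covered_by_spans
  by_cases hnd : needle.toList = []
  · simp only [substring_fully_covered_by_spans, substring_fully_covered_by_spans_alt,
      if_pos hnd]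
  · by_cases hsp : spans = []
    · subst hsp
      have h0 : PySem.List.sorted
          (List.map (fun t : Int × Int × String => (t.1, t.2.1)) ([] : List (Int × Int × String)))
          (fun x : Int × Int => toLex (x.1, x.2)) = [] :=
        (PySem.List.sorted_eq_nil_iff _ _ _).mpr rfl
      unfold substring_fully_covered_by_spans substring_fully_covered_by_spans_alt
      rw [if_neg hnd, if_pos rfl, if_neg hnd, h0, List.foldl_nil, List.reverse_nil, List.any_nil]
    · have hnormne : spans.map (fun t => (t.1, t.2.1)) ≠ [] := by
        simp [hsp]
      have hk : 0 < needle.toList.length := List.length_pos_iff.mpr hnd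
      simp only [substring_fully_covered_by_spans, substring_fully_covered_by_spans_alt,
        if_neg hnd, if_neg hsp]
      rw [mergedB_eq _ hnormne]
      set M := merge_overlapping_intervals (spans.map (fun t => (t.1, t.2.1))) with hM
      have hsep := merged_sep (spans.map (fun t => (t.1, t.2.1)))
      rw [← hM] at hsep
      have hA : pvLoopA haystack.toList needle.toList M (haystack.toList.length + 1) 0 = true ↔
          ∃ p ∈ M, PySem.Chars.isIn needle.toList
            (PySem.List.slice haystack.toList (some (max p.1 0)) (some (max p.2 0))) = true := by
        rw [show (0 : Int) = ((0 : Nat) : Int) by norm_num]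
        rw [pvLoopA_iff haystack.toList needle.toList M hnd (haystack.toList.length + 1) 0
          (Nat.zero_le _) (by omega)]
        constructor
        · rintro ⟨pos, _, hpre, hcov⟩
          rw [cov_iff M hsep _ _ hk] at hcov
          obtain ⟨p, hpm, h1, h2⟩ := hcov
          exact ⟨p, hpm, (isIn_slice_iff _ _ hnd p.1 p.2).mpr ⟨pos, h1, h2, hpre⟩⟩
        · rintro ⟨p, hpm, hin⟩
          obtain ⟨pos, h1, h2, hpre⟩ := (isIn_slice_iff _ _ hnd p.1 p.2).mp hin
          exact ⟨pos, Nat.zero_le _, hpre,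
            (cov_iff M hsep _ _ hk).mpr ⟨p, hpm, h1, h2⟩⟩
      have hB := List.any_eq_true (l := M)
        (p := fun p => PySem.Chars.isIn needle.toList
          (PySem.List.slice haystack.toList (some (max p.1 0)) (some (max p.2 0))))
      exact Bool.coe_iff_coe.mp (hA.trans hB.symm)
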